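-- pv_equiv track=rewrite | github.com/Hydroviet/modis_project | model_parallelism_tf/utils.py | get_block_idx_per_gpu
-- ===== SOURCE A (Python) =====
-- def get_block_idx_per_gpu(num_blocks, gpus):
--     res = []
--     n = num_blocks // gpus
--     m = num_blocks % gpus
--     current_idx = 0
--     for i in range(m):
--         res.append([current_idx, current_idx + n + 1])
--         current_idx += n + 1
--     for i in range(gpus - m):
--         res.append([current_idx, current_idx + n])
--         current_idx += n
--     return res
-- ===== SOURCE B (Python) =====
-- def get_block_idx_per_gpu(num_blocks, gpus):
--     n, m = divmod(num_blocks, gpus)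
--     return [[i * n + min(i, m), (i + 1) * n + min(i + 1, m)]
--             for i in range(gpus)]
-- ===== Notes on version B (the rewrite author's own statement) =====
-- stated objective: simpler
-- what changed: Replaced the accumulator-threaded two-loop construction by a single comprehension computing each GPU's interval in closed form from its index (start = i*n + min(i, m)).
import Mathlib
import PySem

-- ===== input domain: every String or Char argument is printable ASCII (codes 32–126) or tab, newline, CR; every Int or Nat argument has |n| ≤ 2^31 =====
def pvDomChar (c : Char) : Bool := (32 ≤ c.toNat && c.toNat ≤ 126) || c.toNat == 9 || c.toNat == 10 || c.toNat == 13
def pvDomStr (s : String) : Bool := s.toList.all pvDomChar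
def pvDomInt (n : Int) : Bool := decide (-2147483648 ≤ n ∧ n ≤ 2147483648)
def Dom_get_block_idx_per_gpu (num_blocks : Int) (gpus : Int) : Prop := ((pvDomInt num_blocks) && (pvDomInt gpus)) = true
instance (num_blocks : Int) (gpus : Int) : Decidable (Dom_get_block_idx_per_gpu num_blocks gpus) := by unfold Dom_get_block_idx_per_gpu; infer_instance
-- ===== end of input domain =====

-- B replaces A's accumulator-threaded pair of loops by one pass computing each
-- interval in closed form from its index (objective: simpler).

-- ===== PORT A =====
def get_block_idx_per_gpu (num_blocks : Int) (gpus : Int) : List (List Int) :=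
  let n := PySem.Int.floordiv num_blocks gpus
  let m := PySem.Int.mod num_blocks gpus
  -- state = (res, current_idx)
  let s1 := (PySem.List.pyRange 0 m 1).foldl
      (fun (st : List (List Int) × Int) _ => (st.1 ++ [[st.2, st.2 + n + 1]], st.2 + n + 1))
      ([], 0)
  let s2 := (PySem.List.pyRange 0 (gpus - m) 1).foldl
      (fun (st : List (List Int) × Int) _ => (st.1 ++ [[st.2, st.2 + n]], st.2 + n))
      s1
  s2.1

-- ===== PORT B =====
def get_block_idx_per_gpu_alt (num_blocks : Int) (gpus : Int) : List (List Int) :=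
  let n := PySem.Int.floordiv num_blocks gpus
  let m := PySem.Int.mod num_blocks gpus
  (PySem.List.pyRange 0 gpus 1).map
    (fun i => [i * n + min i m, (i + 1) * n + min (i + 1) m])

-- ===== PRECONDITION & SPEC =====
-- Pre_ excludes only gpus = 0, where Python's divmod raises ZeroDivisionError in both A and B.
def Pre_get_block_idx_per_gpu (num_blocks : Int) (gpus : Int) : Prop := gpus ≠ 0
instance (num_blocks : Int) (gpus : Int) : Decidable (Pre_get_block_idx_per_gpu num_blocks gpus) := by unfold Pre_get_block_idx_per_gpu; infer_instance
def pvWitness_get_block_idx_per_gpu : Int × Int := (7, 3)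

def Spec_get_block_idx_per_gpu (num_blocks : Int) (gpus : Int) (out : List (List Int)) : Prop := out = get_block_idx_per_gpu_alt num_blocks gpus
instance (num_blocks : Int) (gpus : Int) (out : List (List Int)) : Decidable (Spec_get_block_idx_per_gpu num_blocks gpus out) := by unfold Spec_get_block_idx_per_gpu; infer_instance

-- ===== CLAIM (what is proved, stated in full; the proofs are below) =====
def Claim_equal_get_block_idx_per_gpu : Prop := ∀ (num_blocks : Int) (gpus : Int), Dom_get_block_idx_per_gpu num_blocks gpus → Pre_get_block_idx_per_gpu num_blocks gpus → Spec_get_block_idx_per_gpu num_blocks gpus (get_block_idx_per_gpu num_blocks gpus)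

-- ===== LEMMAS AND PROOFS =====

-- a foldl whose function ignores the element only iterates
theorem pv_foldl_ignore {α β : Type} (g : α → α) (l : List β) (init : α) :
    l.foldl (fun s _ => g s) init = g^[l.length] init := by
  induction l generalizing init with
  | nil => simp
  | cons x xs ih => simp [List.foldl_cons, ih, Function.iterate_succ_apply]

-- closed form of A's loop body iterated k times
theorem pv_iter_loop (d : Int) (k : Nat) (acc : List (List Int)) (c : Int) :
    (fun (st : List (List Int) × Int) => (st.1 ++ [[st.2, st.2 + d]], st.2 + d))^[k] (acc, c)
      = (acc ++ (List.range k).map (fun (j : Nat) => [c + (j : Int) * d, c + ((j : Int) + 1) * d]),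
         c + (k : Int) * d) := by
  induction k generalizing acc c with
  | zero => simp
  | succ k ih =>
    rw [Function.iterate_succ_apply, ih]
    simp only [Prod.mk.injEq]
    refine ⟨?_, by push_cast; ring⟩
    rw [List.range_succ_eq_map, List.map_cons, List.map_map, List.append_assoc,
        List.singleton_append]
    congr 1
    congr 1
    · norm_num
    apply List.map_congr_left
    intro j _
    simp only [Function.comp, List.cons.injEq, and_true]
    constructor <;> (push_cast; ring)

theorem get_block_idx_per_gpu_eq_alt (num_blocks gpus : Int) (hg : gpus ≠ 0) :
    get_block_idx_per_gpu num_blocks gpus = get_block_idx_per_gpu_alt num_blocks gpus := by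
  simp only [get_block_idx_per_gpu, get_block_idx_per_gpu_alt]
  set n := PySem.Int.floordiv num_blocks gpus with hn
  set m := PySem.Int.mod num_blocks gpus with hm
  rcases lt_or_gt_of_ne hg with hneg | hpos
  · -- gpus < 0 : both sides are []
    obtain ⟨h1, h2⟩ := PySem.Int.mod_neg_bounds (a := num_blocks) (b := gpus) hneg
    rw [PySem.List.pyRange_one_eq_nil (by omega : m ≤ 0),
        PySem.List.pyRange_one_eq_nil (by omega : gpus - m ≤ 0),
        PySem.List.pyRange_one_eq_nil (by omega : gpus ≤ 0)]
    simp
  · -- gpus > 0 : 0 ≤ m < gpus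
    have hm0 : 0 ≤ m := PySem.Int.mod_nonneg (a := num_blocks) hpos
    have hmlt : m < gpus := PySem.Int.mod_lt (a := num_blocks) hpos
    rw [pv_foldl_ignore, pv_foldl_ignore]
    simp only [add_assoc]
    rw [show ((PySem.List.pyRange 0 m 1).length) = m.toNat from by
          rw [PySem.List.length_pyRange_one]; omega]
    rw [show ((PySem.List.pyRange 0 (gpus - m) 1).length) = (gpus - m).toNat from by
          rw [PySem.List.length_pyRange_one]; omega]
    rw [pv_iter_loop (n + 1) m.toNat [] 0, pv_iter_loop]
    dsimp only
    rw [List.nil_append]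
    rw [PySem.List.pyRange_one (a := 0) (b := gpus)]
    rw [show (gpus - 0).toNat = m.toNat + (gpus - m).toNat by omega]
    rw [List.range_add, List.map_append, List.map_append, List.map_map, List.map_map]
    have hmn : ((m.toNat : Int)) = m := by omega
    congr 1
    · apply List.map_congr_left
      intro j hj
      rw [List.mem_range] at hj
      have hjm : (j : Int) < m := by omega
      simp only [Function.comp]
      rw [show min ((0:Int) + (j:Int)) m = (j:Int) by omega,
          show min ((0:Int) + (j:Int) + 1) m = (j:Int) + 1 by omega]
      simp only [List.cons.injEq, and_true]
      constructor <;> ring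
    · rw [List.map_map]
      apply List.map_congr_left
      intro j hj
      rw [List.mem_range] at hj
      have hjm : (j : Int) < gpus - m := by omega
      simp only [Function.comp]
      have hc : ((m.toNat + j : Nat) : Int) = m + j := by omega
      rw [hc, hmn]
      rw [show min ((0:Int) + (m + (j:Int))) m = m by omega,
          show min ((0:Int) + (m + (j:Int)) + 1) m = m by omega]
      simp only [List.cons.injEq, and_true]
      constructor <;> ring

-- ===== VERDICT (by name: the statement is the Claim_ definition above) =====
theorem get_block_idx_per_gpu_spec : Claim_equal_get_block_idx_per_gpu := by
  intro num_blocks gpus _ hpre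
  unfold Spec_get_block_idx_per_gpu
  exact get_block_idx_per_gpu_eq_alt num_blocks gpus hpre
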